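-- pv_equiv track=rewrite | github.com/thealper2/codewars-solutions | 7-kyu/upper_body_strength.py | alex_mistakes
-- ===== SOURCE A (Python) =====
-- def alex_mistakes(number_of_katas, time_limit):
--     kata_time = number_of_katas * 6
--     remaining = time_limit - kata_time
--
--     mistakes, pushup_time = 0, 5
--     while remaining >= pushup_time:
--         remaining -= pushup_time
--         mistakes += 1
--         pushup_time *= 2
--
--     return mistakes
-- ===== SOURCE B (Python) =====
-- def alex_mistakes(number_of_katas, time_limit):
--     q = (time_limit - 6 * number_of_katas) // 5
--     if q < 0:
--         return 0
--     return (q + 1).bit_length() - 1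
-- ===== Notes on version B (the rewrite author's own statement) =====
-- stated objective: faster
-- what changed: Replaces the doubling-subtraction loop by the closed-form solution of the geometric-series inequality 5*(2^m-1) <= remaining: q = remaining//5, answer = bit_length(q+1)-1 (0 when q<0).
import Mathlib
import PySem

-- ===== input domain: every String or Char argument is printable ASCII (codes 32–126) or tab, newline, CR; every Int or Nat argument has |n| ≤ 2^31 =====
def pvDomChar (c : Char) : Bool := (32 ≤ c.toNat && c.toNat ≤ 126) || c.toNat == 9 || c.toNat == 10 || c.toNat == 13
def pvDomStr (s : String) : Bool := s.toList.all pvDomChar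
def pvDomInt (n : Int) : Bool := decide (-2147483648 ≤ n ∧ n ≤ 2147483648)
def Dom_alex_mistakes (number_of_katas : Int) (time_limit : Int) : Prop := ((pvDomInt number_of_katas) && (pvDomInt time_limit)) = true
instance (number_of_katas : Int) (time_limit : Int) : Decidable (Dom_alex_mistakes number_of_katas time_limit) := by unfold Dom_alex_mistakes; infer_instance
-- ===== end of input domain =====

-- B replaces A's doubling-subtraction loop by the closed form of the geometric-series
-- inequality 5*(2^m-1) <= remaining: q = remaining//5, answer = (q+1).bit_length()-1 (0 when q<0).

-- ===== PORT A =====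
-- the while loop of A; the '0 < pushup' conjunct only makes the recursion total
-- (in every actual call pushup is 5*2^k > 0, so it never changes the computation)
def amLoop (remaining pushup mistakes : Int) : Int :=
  if h : 0 < pushup ∧ pushup ≤ remaining then
    amLoop (remaining - pushup) (pushup * 2) (mistakes + 1)
  else
    mistakes
termination_by remaining.toNat
decreasing_by omega

def alex_mistakes (number_of_katas : Int) (time_limit : Int) : Int :=
  let kata_time := number_of_katas * 6
  let remaining := time_limit - kata_time
  amLoop remaining 5 0

-- ===== PORT B =====
def alex_mistakes_alt (number_of_katas : Int) (time_limit : Int) : Int :=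
  let q := PySem.Int.floordiv (time_limit - 6 * number_of_katas) 5
  if q < 0 then 0
  else (PySem.Int.bitLength (q + 1) : Int) - 1

-- ===== PRECONDITION & SPEC =====
def Spec_alex_mistakes (number_of_katas : Int) (time_limit : Int) (out : Int) : Prop := out = alex_mistakes_alt number_of_katas time_limit
instance (number_of_katas : Int) (time_limit : Int) (out : Int) : Decidable (Spec_alex_mistakes number_of_katas time_limit out) := by unfold Spec_alex_mistakes; infer_instance

-- ===== CLAIM (what is proved, stated in full; the proofs are below) =====
def Claim_equal_alex_mistakes : Prop := ∀ (number_of_katas : Int) (time_limit : Int), Dom_alex_mistakes number_of_katas time_limit → Spec_alex_mistakes number_of_katas time_limit (alex_mistakes number_of_katas time_limit)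

-- ===== LEMMAS AND PROOFS =====

-- the floor-division bracket for a positive divisor, as two inequalities
lemma fdiv_brackets {a b : Int} (hb : 0 < b) :
    PySem.Int.floordiv a b * b ≤ a ∧ a < (PySem.Int.floordiv a b + 1) * b :=
  (PySem.Int.floordiv_eq_iff_of_pos hb).mp rfl

-- halving step: (r - p) // (2p) = (r//p - 1) // 2  for 0 < p
lemma fdiv_sub_double {r p : Int} (hp : 0 < p) :
    PySem.Int.floordiv (r - p) (2 * p) = PySem.Int.floordiv (PySem.Int.floordiv r p - 1) 2 := by
  obtain ⟨h1, h2⟩ := fdiv_brackets (a := r) hp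
  obtain ⟨h3, h4⟩ := fdiv_brackets (a := PySem.Int.floordiv r p - 1) (b := 2) (by norm_num)
  set q := PySem.Int.floordiv r p with hq
  set c := PySem.Int.floordiv (q - 1) 2 with hc
  have h2p : (0:Int) < 2 * p := by omega
  rw [PySem.Int.floordiv_eq_iff_of_pos h2p]
  constructor
  · nlinarith
  · nlinarith

lemma amLoop_eq (n : Nat) (r p m : Int) (hn : r.toNat ≤ n) (hp : 0 < p) :
    amLoop r p m = m + (if PySem.Int.floordiv r p < 0 then 0
      else (PySem.Int.bitLength (PySem.Int.floordiv r p + 1) : Int) - 1) := by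
  induction n generalizing r p m with
  | zero =>
    have hr : r < p := by omega
    rw [amLoop]
    obtain ⟨h1, h2⟩ := fdiv_brackets (a := r) hp
    have hq : PySem.Int.floordiv r p ≤ 0 := by nlinarith
    simp only [dif_neg (by omega : ¬(0 < p ∧ p ≤ r))]
    rcases lt_or_eq_of_le hq with h | h
    · rw [if_pos h]; omega
    · rw [if_neg (by omega), h]; norm_num [show PySem.Int.bitLength 1 = 1 from rfl]
  | succ n ih =>
    by_cases hc : p ≤ r
    · rw [amLoop, dif_pos ⟨hp, hc⟩]
      rw [ih (r - p) (p * 2) (m + 1) (by omega) (by omega)]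
      rw [(by ring : p * 2 = 2 * p), fdiv_sub_double hp]
      obtain ⟨h1, h2⟩ := fdiv_brackets (a := r) hp
      set q := PySem.Int.floordiv r p with hq
      have hq1 : 1 ≤ q := by nlinarith
      obtain ⟨h3, h4⟩ := fdiv_brackets (a := q - 1) (b := 2) (by norm_num)
      set c := PySem.Int.floordiv (q - 1) 2 with hc2
      have hc0 : 0 ≤ c := by omega
      rw [if_neg (by omega), if_neg (by omega)]
      have hbl : PySem.Int.bitLength (q + 1) =
          PySem.Int.bitLength (PySem.Int.floordiv (q + 1) 2) + 1 :=
        PySem.Int.bitLength_of_pos (by omega)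
      have hhalf : PySem.Int.floordiv (q + 1) 2 = c + 1 := by
        rw [PySem.Int.floordiv_eq_iff_of_pos (by norm_num : (0:Int) < 2)]
        omega
      rw [hbl, hhalf]
      push_cast
      ring
    · rw [amLoop, dif_neg (by omega : ¬(0 < p ∧ p ≤ r))]
      obtain ⟨h1, h2⟩ := fdiv_brackets (a := r) hp
      have hq : PySem.Int.floordiv r p ≤ 0 := by nlinarith
      rcases lt_or_eq_of_le hq with h | h
      · rw [if_pos h]; omega
      · rw [if_neg (by omega), h]; norm_num [show PySem.Int.bitLength 1 = 1 from rfl]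

-- ===== VERDICT (by name: the statement is the Claim_ definition above) =====
theorem alex_mistakes_spec : Claim_equal_alex_mistakes := by
  intro k t _
  unfold Spec_alex_mistakes alex_mistakes alex_mistakes_alt
  rw [amLoop_eq (t - k * 6).toNat _ _ _ le_rfl (by norm_num)]
  rw [(by ring : t - k * 6 = t - 6 * k)]
  simp only [zero_add]
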